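-- pv_equiv track=rewrite | github.com/byoosipos/vacker-automation | vacker_automation/vacker_automation/doctype/ai_risk_manager/intelligent_validation_engine.py | determine_experience_level
-- ===== SOURCE A (Python) =====
-- def determine_experience_level(roles):
--     """Determine user experience level based on roles"""
--     if any(role in roles for role in ['System Manager', 'Administrator']):
--         return 'expert'
--     elif any(role in roles for role in ['Accounts Manager', 'HR Manager', 'Projects Manager']):
--         return 'experienced'
--     elif any(role in roles for role in ['Accounts User', 'HR User', 'Projects User']):
--         return 'intermediate'
--     else:
--         return 'beginner'
-- ===== SOURCE B (Python) =====
-- _RANK = {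
--     'System Manager': 3, 'Administrator': 3,
--     'Accounts Manager': 2, 'HR Manager': 2, 'Projects Manager': 2,
--     'Accounts User': 1, 'HR User': 1, 'Projects User': 1,
-- }
-- _LEVELS = ['beginner', 'intermediate', 'experienced', 'expert']
--
-- def determine_experience_level(roles):
--     """Determine user experience level based on roles"""
--     best = 0
--     for r in roles:
--         best = max(best, _RANK.get(r, 0))
--     return _LEVELS[best]
-- ===== Notes on version B (the rewrite author's own statement) =====
-- stated objective: simpler
-- what changed: Replaced the four-tier cascade of any()-membership tests with a role->rank lookup table, a single max-rank pass over roles, and indexing into a level list.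
import Mathlib
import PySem

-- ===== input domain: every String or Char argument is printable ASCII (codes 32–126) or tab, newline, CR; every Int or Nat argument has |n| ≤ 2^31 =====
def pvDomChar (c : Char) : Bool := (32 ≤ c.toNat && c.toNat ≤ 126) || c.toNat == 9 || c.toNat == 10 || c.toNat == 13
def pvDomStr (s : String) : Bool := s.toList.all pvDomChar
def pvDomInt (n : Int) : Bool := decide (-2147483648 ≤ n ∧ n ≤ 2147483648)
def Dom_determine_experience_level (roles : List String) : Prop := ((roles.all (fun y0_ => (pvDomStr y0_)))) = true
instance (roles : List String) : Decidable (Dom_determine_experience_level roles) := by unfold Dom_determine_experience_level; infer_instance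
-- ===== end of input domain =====

-- B replaces A's cascade of membership tests by one pass taking the max rank from a role→rank table (objective: simpler).

-- ===== PORT A =====
def determine_experience_level (roles : List String) : String :=
  if ["System Manager", "Administrator"].any (fun role => roles.contains role) then "expert"
  else if ["Accounts Manager", "HR Manager", "Projects Manager"].any (fun role => roles.contains role) then "experienced"
  else if ["Accounts User", "HR User", "Projects User"].any (fun role => roles.contains role) then "intermediate"
  else "beginner"

-- ===== PORT B =====
def pvRankTable : PySem.Dict String Int :=
  PySem.Dict.ofList [("System Manager", 3), ("Administrator", 3),
    ("Accounts Manager", 2), ("HR Manager", 2), ("Projects Manager", 2),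
    ("Accounts User", 1), ("HR User", 1), ("Projects User", 1)]

def pvLevels : List String := ["beginner", "intermediate", "experienced", "expert"]

def determine_experience_level_alt (roles : List String) : String :=
  let best := roles.foldl (fun best r => max best (pvRankTable.getD r 0)) 0
  (PySem.List.pyGet? pvLevels best).getD ""

-- ===== PRECONDITION & SPEC =====
def Spec_determine_experience_level (roles : List String) (out : String) : Prop := out = determine_experience_level_alt roles
instance (roles : List String) (out : String) : Decidable (Spec_determine_experience_level roles out) := by unfold Spec_determine_experience_level; infer_instance

-- ===== CLAIM (what is proved, stated in full; the proofs are below) =====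
def Claim_equal_determine_experience_level : Prop := ∀ (roles : List String), Dom_determine_experience_level roles → Spec_determine_experience_level roles (determine_experience_level roles)

-- ===== LEMMAS AND PROOFS =====

def pvRank (r : String) : Int := pvRankTable.getD r 0

lemma pvRank_eq (r : String) : pvRank r =
    (if r = "System Manager" ∨ r = "Administrator" then 3
     else if r = "Accounts Manager" ∨ r = "HR Manager" ∨ r = "Projects Manager" then 2
     else if r = "Accounts User" ∨ r = "HR User" ∨ r = "Projects User" then 1
     else 0) := by
  simp only [pvRank, pvRankTable, PySem.Dict.ofList, PySem.Dict.update, List.foldl,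
    PySem.Dict.getD_insert, PySem.Dict.getD_empty]
  split_ifs <;> simp_all

lemma pvRank_nonneg (r : String) : 0 ≤ pvRank r := by
  rw [pvRank_eq]; split_ifs <;> norm_num

lemma pvFold_acc (roles : List String) : ∀ a : Int, 0 ≤ a →
    roles.foldl (fun best r => max best (pvRank r)) a
      = max a (roles.foldl (fun best r => max best (pvRank r)) 0) := by
  induction roles with
  | nil => intro a ha; simp [max_eq_left ha]
  | cons r rs ih =>
    intro a ha
    have hr := pvRank_nonneg r
    simp only [List.foldl_cons]
    rw [ih (max a (pvRank r)) (le_max_of_le_left ha),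
        ih (max 0 (pvRank r)) (le_max_of_le_left le_rfl),
        max_eq_right hr, max_assoc]

lemma pvBest_eq (roles : List String) :
    roles.foldl (fun best r => max best (pvRank r)) 0 =
      (if roles.contains "System Manager" || roles.contains "Administrator" then 3
       else if roles.contains "Accounts Manager" || roles.contains "HR Manager" || roles.contains "Projects Manager" then 2
       else if roles.contains "Accounts User" || roles.contains "HR User" || roles.contains "Projects User" then 1
       else 0) := by
  induction roles with
  | nil => simp
  | cons r rs ih =>
    simp only [List.foldl_cons, List.contains_cons]
    rw [pvFold_acc rs (max 0 (pvRank r)) (le_max_of_le_left le_rfl),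
        max_eq_right (pvRank_nonneg r), ih, pvRank_eq]
    simp only [List.contains_eq_mem, Bool.or_eq_true, decide_eq_true_eq]
    split_ifs <;> simp_all [eq_comm (b := r)]

-- ===== VERDICT (by name: the statement is the Claim_ definition above) =====
theorem determine_experience_level_spec : Claim_equal_determine_experience_level := by
  intro roles _
  unfold Spec_determine_experience_level determine_experience_level determine_experience_level_alt
  show _ = (PySem.List.pyGet? pvLevels (roles.foldl (fun best r => max best (pvRank r)) 0)).getD ""
  rw [pvBest_eq]
  simp only [List.any_cons, List.any_nil, Bool.or_false]
  split_ifs <;> simp_all <;> rfl
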